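-- pv_equiv track=rewrite | github.com/julia722/MLAlgorithms | feature.py | model_two
-- ===== SOURCE A (Python) =====
-- def model_two(dict, data):
--     label, data = data
--     fdata = list()
--     for line in data:
--         seen = set()
--         for word in line:
--             if word in dict.keys() and line.count(word) < 4:
--                 seen.add(dict[word])
--         fdata.append(seen)
--     return label, fdata
-- ===== SOURCE B (Python) =====
-- def model_two(dict, data):
--     label, lines = data
--     fdata = []
--     for line in lines:
--         s = sorted(line)
--         rare = set()
--         i = 0
--         while i < len(s):
--             j = i + 1
--             while j < len(s) and s[j] == s[i]:
--                 j += 1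
--             if j - i < 4:
--                 rare.add(s[i])
--             i = j
--         fdata.append({dict[w] for w in line if w in dict and w in rare})
--     return label, fdata
-- ===== Notes on version B (the rewrite author's own statement) =====
-- stated objective: faster
-- what changed: B sorts each line and run-length-encodes the sorted copy to find the rare (count<4) words, then does one linear membership pass over the line, replacing A's per-token line.count rescans.
import Mathlib
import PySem

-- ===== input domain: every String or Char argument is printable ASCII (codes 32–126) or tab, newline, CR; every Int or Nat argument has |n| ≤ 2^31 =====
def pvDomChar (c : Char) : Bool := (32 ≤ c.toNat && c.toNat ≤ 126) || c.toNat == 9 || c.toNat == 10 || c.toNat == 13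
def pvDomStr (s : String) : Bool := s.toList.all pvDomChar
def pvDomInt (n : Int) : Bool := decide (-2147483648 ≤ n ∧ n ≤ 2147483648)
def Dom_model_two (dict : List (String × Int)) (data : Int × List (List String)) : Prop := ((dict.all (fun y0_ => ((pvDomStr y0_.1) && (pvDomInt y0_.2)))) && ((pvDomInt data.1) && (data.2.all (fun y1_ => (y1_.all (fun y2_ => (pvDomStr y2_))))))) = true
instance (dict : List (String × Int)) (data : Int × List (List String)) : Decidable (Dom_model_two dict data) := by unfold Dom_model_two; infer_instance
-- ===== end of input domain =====

-- B finds each line's rare (count<4) words by sorting the line and run-length-encoding the sorted copy, then one membership pass over the line, instead of A's per-token line.count rescans; return value only.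


-- ===== PORT A =====
def model_two (dict : List (String × Int)) (data : Int × List (List String)) : Int × List (List Int) :=
  let d : PySem.Dict String Int := PySem.Dict.mk dict
  let fdata : List (List Int) := data.2.foldl (fun fdata line =>
    fdata ++ [line.foldl (fun seen word =>
      match d.get? word with                                -- 'word in dict.keys()' and 'dict[word]'
      | some v => if PySem.List.count line word < 4 then PySem.Set.add seen v else seen
      | none => seen) PySem.Set.empty]) []
  (data.1, fdata)

-- ===== PORT B =====
-- the 'while i < len(s)' run-scan over the sorted line: each step consumes one run of equal words
def rareOf : List String → PySem.Set String → PySem.Set String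
  | [], rare => rare
  | x :: xs, rare =>
    let run := xs.takeWhile (fun y => y == x)               -- 'while j < len(s) and s[j] == s[i]: j += 1'
    let rest := xs.dropWhile (fun y => y == x)
    rareOf rest (if (1 + run.length : Int) < 4 then PySem.Set.add rare x else rare)   -- 'if j - i < 4: rare.add(s[i])'
  termination_by s => s.length
  decreasing_by simpa using Nat.lt_succ_of_le (List.length_dropWhile_le _ _)

def model_two_alt (dict : List (String × Int)) (data : Int × List (List String)) : Int × List (List Int) :=
  let d : PySem.Dict String Int := PySem.Dict.mk dict
  let fdata : List (List Int) := data.2.foldl (fun fdata line =>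
    let rare := rareOf (PySem.List.sorted line (fun w => w) false) PySem.Set.empty
    fdata ++ [line.foldl (fun seen word =>
      match d.get? word with
      | some v => if rare.contains word then PySem.Set.add seen v else seen
      | none => seen) PySem.Set.empty]) []
  (data.1, fdata)

-- ===== PRECONDITION & SPEC =====
def Spec_model_two (dict : List (String × Int)) (data : Int × List (List String)) (out : Int × List (List Int)) : Prop := out = model_two_alt dict data
instance (dict : List (String × Int)) (data : Int × List (List String)) (out : Int × List (List Int)) : Decidable (Spec_model_two dict data out) := by unfold Spec_model_two; infer_instance

-- ===== CLAIM (what is proved, stated in full; the proofs are below) =====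
def Claim_equal_model_two : Prop := ∀ (dict : List (String × Int)) (data : Int × List (List String)), Dom_model_two dict data → Spec_model_two dict data (model_two dict data)

-- ===== LEMMAS AND PROOFS =====

-- in a ≤-sorted list, the head's run is ALL its occurrences: none remain after dropWhile
theorem not_mem_dropWhile_of_pairwise (x : String) (xs : List String)
    (h : (x :: xs).Pairwise (· ≤ ·)) : x ∉ xs.dropWhile (fun y => y == x) := by
  intro hx
  have hsub : (xs.dropWhile (fun y => y == x)).Sublist xs := List.dropWhile_sublist _
  cases hr : xs.dropWhile (fun y => y == x) with
  | nil => simp [hr] at hx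
  | cons h0 t =>
    have hh0 : ¬ (h0 == x) = true := by
      have := List.head?_dropWhile_not (fun y => y == x) xs
      rw [hr] at this; simpa using this
    have hh0' : h0 ≠ x := by simpa using hh0
    rw [hr] at hx hsub
    have hle1 : x ≤ h0 := by
      have hmem : h0 ∈ xs := hsub.subset (List.mem_cons_self)
      exact (List.pairwise_cons.1 h).1 h0 hmem
    have hle2 : h0 ≤ x := by
      rcases List.mem_cons.1 hx with rfl | hx'
      · exact le_refl _
      · have hp : (h0 :: t).Pairwise (· ≤ ·) :=
          ((List.pairwise_cons.1 h).2).sublist hsub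
        exact (List.pairwise_cons.1 hp).1 x hx'
    exact hh0' (le_antisymm hle2 hle1)

-- membership in the run-scan's result set: x there ↔ already there, or occurs (with count < 4) in the sorted remainder
theorem mem_rareOf (s : List String) (acc : PySem.Set String)
    (hs : s.Pairwise (· ≤ ·)) (w : String) :
    w ∈ rareOf s acc ↔ w ∈ acc ∨ (w ∈ s ∧ s.count w < 4) := by
  induction s, acc using rareOf.induct with
  | case1 acc => simp [rareOf]
  | case2 x xs acc run rest ih =>
    have hrunx : ∀ y ∈ run, y = x := by
      intro y hy
      have := List.mem_takeWhile_imp (l := xs) (p := fun y => y == x) hy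
      simpa using this
    have hxrest : x ∉ rest := not_mem_dropWhile_of_pairwise x xs hs
    have hxs : xs = run ++ rest := (List.takeWhile_append_dropWhile).symm
    have hrest : rest.Pairwise (· ≤ ·) :=
      ((List.pairwise_cons.1 hs).2).sublist (List.dropWhile_sublist _)
    rw [rareOf]
    have ih' := ih hrest
    simp only [dite_eq_ite] at ih'
    rw [show (List.dropWhile (fun y => y == x) xs) = rest from rfl,
        show (List.takeWhile (fun y => y == x) xs) = run from rfl, ih']
    have hcx : (x :: xs).count x = 1 + run.length := by
      rw [hxs, List.count_cons_self, List.count_append,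
        List.count_eq_length.2 (fun y hy => ((hrunx y hy).symm : x = y)),
        List.count_eq_zero.2 hxrest]
      omega
    by_cases hwx : w = x
    · subst hwx
      have hwrest : w ∉ rest := hxrest
      by_cases hlt : (1 + (run.length : Int)) < 4
      · simp only [if_pos hlt, PySem.Set.mem_add]
        constructor
        · rintro ((ha | _) | hw)
          · exact Or.inl ha
          · exact Or.inr ⟨List.mem_cons_self, by rw [hcx]; omega⟩
          · exact absurd hw.1 hwrest
        · rintro (ha | hw)
          · exact Or.inl (Or.inl ha)
          · exact Or.inl (Or.inr trivial)
      · simp only [if_neg hlt]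
        constructor
        · rintro (ha | hw)
          · exact Or.inl ha
          · exact absurd hw.1 hwrest
        · rintro (ha | hw)
          · exact Or.inl ha
          · exfalso; rw [hcx] at hw; omega
    · have hwrun : w ∉ run := fun hw => hwx (hrunx w hw)
      have hmem : w ∈ x :: xs ↔ w ∈ rest := by
        simp only [hxs, List.mem_cons, List.mem_append]
        constructor
        · rintro (rfl | hw | hw)
          · exact absurd rfl hwx
          · exact absurd hw hwrun
          · exact hw
        · exact fun hw => Or.inr (Or.inr hw)
      have hcw : (x :: xs).count w = rest.count w := by
        rw [hxs, List.count_cons_of_ne (fun h => hwx h.symm), List.count_append,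
          List.count_eq_zero.2 hwrun]
        omega
      have hacc : w ∈ (if (1 + (run.length : Int)) < 4 then PySem.Set.add acc x else acc) ↔ w ∈ acc := by
        split
        · rw [PySem.Set.mem_add]; simp [hwx]
        · exact Iff.rfl
      rw [hacc, hmem, hcw]

-- the two per-line folds agree: membership in rare ↔ count < 4, for words of the line
theorem line_eq (d : PySem.Dict String Int) (line : List String) :
    line.foldl (fun seen word =>
      match d.get? word with
      | some v => if PySem.List.count line word < 4 then PySem.Set.add seen v else seen
      | none => seen) PySem.Set.empty
    = line.foldl (fun seen word =>
      match d.get? word with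
      | some v => if (rareOf (PySem.List.sorted line (fun w => w) false) PySem.Set.empty).contains word then PySem.Set.add seen v else seen
      | none => seen) PySem.Set.empty := by
  refine (PySem.List.foldl_congr_mem _ _ _ _ ?_).symm
  intro seen word hw
  have hsortmem : word ∈ PySem.List.sorted line (fun w => w) false :=
    (PySem.List.mem_sorted _ _ _ _).2 hw
  have hcnt : (PySem.List.sorted line (fun w => w) false).count word = line.count word :=
    (PySem.List.sorted_perm line (fun w => w) false).count_eq word
  have hpw : (PySem.List.sorted line (fun w => w) false).Pairwise (· ≤ ·) := by
    simpa using PySem.List.sorted_pairwise line (fun w => w)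
  have hiff : (rareOf (PySem.List.sorted line (fun w => w) false) PySem.Set.empty).contains word = true
      ↔ PySem.List.count line word < 4 := by
    rw [PySem.Set.contains_iff, mem_rareOf _ _ hpw]
    simp only [PySem.Set.empty, List.not_mem_nil, false_or] at *
    constructor
    · rintro ⟨-, hc⟩
      rw [hcnt] at hc
      simp [PySem.List.count]; exact_mod_cast hc
    · intro hc
      refine ⟨hsortmem, ?_⟩
      rw [hcnt]
      simp [PySem.List.count] at hc; exact_mod_cast hc
  cases d.get? word with
  | none => rfl
  | some v =>
    by_cases hc : PySem.List.count line word < 4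
    · simp only [hiff, hc, if_true]
    · simp only [hiff, hc, if_false]

-- ===== VERDICT (by name: the statement is the Claim_ definition above) =====
theorem model_two_spec : Claim_equal_model_two := by
  intro dict data _
  unfold Spec_model_two model_two model_two_alt
  refine Prod.ext rfl ?_
  simp only [PySem.List.foldl_append_singleton_eq_map, List.nil_append]
  exact List.map_congr_left (fun line _ => line_eq (PySem.Dict.mk dict) line)
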